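-- pv_equiv track=rewrite | github.com/janursa/MSC_M | plots.py | adjust_x_label
-- ===== SOURCE A (Python) =====
-- def adjust_x_label(labels):
-- 	adj_labels = []
-- 	for label in labels:
-- 		if label == 'ctr':
-- 			adj_labels.append('0')
-- 		elif label == 'IL10_.01':
-- 			adj_labels.append('0.01')
-- 		elif label == 'IL10_.1':
-- 			adj_labels.append('0.1')
-- 		elif label == 'IL10_1':
-- 			adj_labels.append('1')
-- 		elif label == 'IL10_10':
-- 			adj_labels.append('10')
-- 		elif label == 'IL10_100':
-- 			adj_labels.append('100')
-- 		elif label == 'TNFa_.1':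
-- 			adj_labels.append('0.1')
-- 		elif label == 'TNFa_1':
-- 			adj_labels.append('1')
-- 		elif label == 'TNFa_10':
-- 			adj_labels.append('10')
-- 		elif label == 'IL8_1':
-- 			adj_labels.append('1')
-- 		elif label == 'IL8_10':
-- 			adj_labels.append('10')
-- 		elif label == 'IL8_100':
-- 			adj_labels.append('100')
-- 		elif label == 'IL1b_1':
-- 			adj_labels.append('1')
-- 		elif label == 'IL1b_10':
-- 			adj_labels.append('10')
-- 		elif label == 'IL1b_100':
-- 			adj_labels.append('100')
-- 		else:
-- 			raise ValueError('not defined')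
-- 	return adj_labels
-- ===== SOURCE B (Python) =====
-- # Doses known per cytokine; the output is COMPUTED from the dose suffix
-- # ('.x' -> '0.x', otherwise the suffix itself), not looked up per label.
-- _DOSES = {
--     'IL10': ('.01', '.1', '1', '10', '100'),
--     'TNFa': ('.1', '1', '10'),
--     'IL8': ('1', '10', '100'),
--     'IL1b': ('1', '10', '100'),
-- }
--
-- def adjust_x_label(labels):
--     out = []
--     for label in labels:
--         if label == 'ctr':
--             out.append('0')
--             continue
--         parts = label.split('_', 1)
--         if len(parts) == 2 and parts[1] in _DOSES.get(parts[0], ()):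
--             dose = parts[1]
--             out.append('0' + dose if dose.startswith('.') else dose)
--         else:
--             raise ValueError('not defined')
--     return out
-- ===== Notes on version B (the rewrite author's own statement) =====
-- stated objective: alternative
-- what changed: Instead of a 15-way ladder mapping whole labels to hard-coded output strings, B parses each label into cytokine and dose by splitting on '_', validates the dose against the per-cytokine dose table, and computes the output from the dose suffix ('.x' becomes '0.x', otherwise the suffix itself).
import Mathlib
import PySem

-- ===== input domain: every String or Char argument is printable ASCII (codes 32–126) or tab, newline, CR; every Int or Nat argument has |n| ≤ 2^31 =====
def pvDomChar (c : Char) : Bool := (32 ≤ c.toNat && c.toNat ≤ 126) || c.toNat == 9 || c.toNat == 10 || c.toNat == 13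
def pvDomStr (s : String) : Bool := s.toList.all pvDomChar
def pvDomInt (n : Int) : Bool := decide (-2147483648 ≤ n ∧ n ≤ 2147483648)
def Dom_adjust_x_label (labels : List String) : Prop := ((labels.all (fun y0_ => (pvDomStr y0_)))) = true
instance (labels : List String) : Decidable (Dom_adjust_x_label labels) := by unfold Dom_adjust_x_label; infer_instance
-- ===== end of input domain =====

-- B parses each label (split on '_', per-cytokine dose table, '0'+dose for '.x' doses) instead of A's 15-way label ladder; alternative decomposition, same values.


-- ===== PORT A =====
-- one iteration of A's if-elif ladder: some v = the value appended, none = the 'raise' branch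
def adjustOne (label : String) : Option String :=
  if label == "ctr" then some "0"
  else if label == "IL10_.01" then some "0.01"
  else if label == "IL10_.1" then some "0.1"
  else if label == "IL10_1" then some "1"
  else if label == "IL10_10" then some "10"
  else if label == "IL10_100" then some "100"
  else if label == "TNFa_.1" then some "0.1"
  else if label == "TNFa_1" then some "1"
  else if label == "TNFa_10" then some "10"
  else if label == "IL8_1" then some "1"
  else if label == "IL8_10" then some "10"
  else if label == "IL8_100" then some "100"
  else if label == "IL1b_1" then some "1"
  else if label == "IL1b_10" then some "10"
  else if label == "IL1b_100" then some "100"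
  else none

-- A's loop: accumulate appended values; none once the raise branch is hit
def adjustGo : List String → Option (List String)
  | [] => some []
  | l :: rest =>
    match adjustOne l with
    | none => none
    | some v => (adjustGo rest).map (v :: ·)

def adjust_x_label (labels : List String) : List String :=
  (adjustGo labels).getD []   -- the none case is excluded by Pre_ (Python raises ValueError there)

-- ===== PORT B =====
-- B's per-cytokine dose table (_DOSES in Source B)
def dosesTable : PySem.Dict String (List String) :=
  PySem.Dict.ofList [("IL10", [".01", ".1", "1", "10", "100"]),
    ("TNFa", [".1", "1", "10"]),
    ("IL8", ["1", "10", "100"]),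
    ("IL1b", ["1", "10", "100"])]

-- one iteration of B's loop: parse label, validate dose, compute output; none = the 'raise' branch
def adjustAltOne (label : String) : Option String :=
  if label == "ctr" then some "0"
  else
    match (PySem.Str.splitMax? label "_" 1).getD [] with   -- label.split('_', 1); sep ≠ "" so never none
    | [head, dose] =>
      if (dosesTable.getD head []).contains dose then
        -- '0' + dose if dose.startswith('.') else dose ('+' on strings ported as prepending the char, exact)
        some (if PySem.Str.startswith dose "." then String.mk ('0' :: dose.toList) else dose)
      else none
    | _ => none

def adjust_x_label_alt (labels : List String) : List String :=
  labels.map (fun l => (adjustAltOne l).getD "")   -- the none case is excluded by Pre_ (Python raises ValueError there)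

-- ===== PRECONDITION & SPEC =====
-- Pre_ excludes exactly the inputs with a label outside the 15 known ones, on which A raises ValueError('not defined')
def Pre_adjust_x_label (labels : List String) : Prop :=
  (labels.all (fun l => l ∈ ["ctr", "IL10_.01", "IL10_.1", "IL10_1", "IL10_10", "IL10_100",
    "TNFa_.1", "TNFa_1", "TNFa_10", "IL8_1", "IL8_10", "IL8_100",
    "IL1b_1", "IL1b_10", "IL1b_100"])) = true
instance (labels : List String) : Decidable (Pre_adjust_x_label labels) := by
  unfold Pre_adjust_x_label; infer_instance

def pvWitness_adjust_x_label : List String := ["ctr", "TNFa_10", "IL10_.01"]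

def Spec_adjust_x_label (labels : List String) (out : List String) : Prop := out = adjust_x_label_alt labels
instance (labels : List String) (out : List String) : Decidable (Spec_adjust_x_label labels out) := by unfold Spec_adjust_x_label; infer_instance

-- ===== CLAIM (what is proved, stated in full; the proofs are below) =====
def Claim_equal_adjust_x_label : Prop := ∀ (labels : List String), Dom_adjust_x_label labels → Pre_adjust_x_label labels → Spec_adjust_x_label labels (adjust_x_label labels)

-- ===== LEMMAS AND PROOFS =====
theorem adjustOne_eq_alt (l : String)
    (h : l ∈ ["ctr", "IL10_.01", "IL10_.1", "IL10_1", "IL10_10", "IL10_100",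
      "TNFa_.1", "TNFa_1", "TNFa_10", "IL8_1", "IL8_10", "IL8_100",
      "IL1b_1", "IL1b_10", "IL1b_100"]) :
    ∃ v, adjustOne l = some v ∧ adjustAltOne l = some v := by
  fin_cases h <;> exact ⟨_, rfl, by decide⟩

theorem adjustGo_eq_some (labels : List String)
    (h : ∀ l ∈ labels, l ∈ ["ctr", "IL10_.01", "IL10_.1", "IL10_1", "IL10_10", "IL10_100",
      "TNFa_.1", "TNFa_1", "TNFa_10", "IL8_1", "IL8_10", "IL8_100",
      "IL1b_1", "IL1b_10", "IL1b_100"]) :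
    adjustGo labels = some (adjust_x_label_alt labels) := by
  induction labels with
  | nil => rfl
  | cons l rest ih =>
    obtain ⟨v, h1, h2⟩ := adjustOne_eq_alt l (h l (List.mem_cons_self ..))
    simp [adjustGo, adjust_x_label_alt, h1, h2,
      ih (fun x hx => h x (List.mem_cons_of_mem _ hx))]

-- ===== VERDICT (by name: the statement is the Claim_ definition above) =====
theorem adjust_x_label_spec : Claim_equal_adjust_x_label := by
  intro labels _ hpre
  unfold Spec_adjust_x_label adjust_x_label
  rw [adjustGo_eq_some labels (by simpa [Pre_adjust_x_label, List.all_eq_true] using hpre)]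
  rfl
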